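-- pv_equiv track=rewrite | github.com/sssfasih/LeetCode-Solutions | 2335-minimum-amount-of-time-to-fill-cups/2335-minimum-amount-of-time-to-fill-cups.py | fillCups
-- ===== SOURCE A (Python) =====
-- from typing import List
--
-- def fillCups(amount: List[int]) -> int:
--     amount.sort()
--     ans=0
--     while amount[2] > 0:
--         ans +=1
--         amount[2] -= 1
--         amount[1]-=1
--         amount.sort()
--     return ans
-- ===== SOURCE B (Python) =====
-- def fillCups(amount):
--     # Closed form: only the three smallest values matter; answer is
--     # max(largest, ceil(total/2)) over their nonnegative parts.
--     x, y, z = sorted(amount)[:3]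
--     x = max(x, 0)
--     y = max(y, 0)
--     z = max(z, 0)
--     return max(z, (x + y + z + 1) // 2)
-- ===== Notes on version B (the rewrite author's own statement) =====
-- stated objective: alternative
-- what changed: Replaces the one-step-at-a-time simulation loop (decrement the two largest, re-sort, repeat) with the closed form max(largest, ceil(total/2)) over the nonnegative parts of the three smallest elements.
import Mathlib
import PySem

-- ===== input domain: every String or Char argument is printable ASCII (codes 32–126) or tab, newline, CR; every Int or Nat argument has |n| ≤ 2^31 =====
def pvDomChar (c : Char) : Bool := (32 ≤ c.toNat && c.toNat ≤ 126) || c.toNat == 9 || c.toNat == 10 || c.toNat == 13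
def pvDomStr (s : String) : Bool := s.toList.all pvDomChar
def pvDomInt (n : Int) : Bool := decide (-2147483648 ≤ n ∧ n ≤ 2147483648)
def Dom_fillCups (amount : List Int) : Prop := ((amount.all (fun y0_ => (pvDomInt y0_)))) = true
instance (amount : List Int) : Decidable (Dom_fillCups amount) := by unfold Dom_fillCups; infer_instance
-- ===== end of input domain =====

-- B replaces A's step-by-step simulation loop with a closed form over the three smallest
-- elements (objective: alternative). Note: A sorts `amount` in place; B does not mutate
-- it — the equivalence proved here is about the return value only.

-- ===== PORT A =====

-- Strict upper bound on the number of iterations of A's while loop (sum of the clamped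
-- first three elements of the sorted list, plus one); used only as a totality fuel.
def pvClampSum3 (l : List Int) : Nat := ((l.take 3).map Int.toNat).sum

-- A's while loop. The fuel argument only makes the recursion structural; it is chosen
-- large enough that it never runs out (proved in fillCupsLoop_closed below).
def fillCupsLoop (fuel : Nat) (ans : Int) (l : List Int) : Int :=
  match fuel with
  | 0 => ans
  | fuel + 1 =>
      match PySem.List.sorted l (fun x => x) false with
      | a :: b :: c :: rest =>
          if c > 0 then fillCupsLoop fuel (ans + 1) (a :: (b - 1) :: (c - 1) :: rest)
          else ans
      | _ => ans

def fillCups (amount : List Int) : Int :=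
  fillCupsLoop (pvClampSum3 (PySem.List.sorted amount (fun x => x) false) + 1) 0 amount

-- ===== PORT B =====
def fillCups_alt (amount : List Int) : Int :=
  match (PySem.List.sorted amount (fun x => x) false).take 3 with
  | [x, y, z] =>
      let x' := max x 0
      let y' := max y 0
      let z' := max z 0
      max z' (PySem.Int.floordiv (x' + y' + z' + 1) 2)
  | _ => 0

-- ===== PRECONDITION & SPEC =====
-- Pre_ excludes only the lists of length < 3, on which A raises IndexError (and B raises
-- ValueError during tuple unpacking).
def Pre_fillCups (amount : List Int) : Prop := 3 ≤ amount.length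
instance (amount : List Int) : Decidable (Pre_fillCups amount) := by
  unfold Pre_fillCups; infer_instance
def pvWitness_fillCups : List Int := [1, 4, 2]

def Spec_fillCups (amount : List Int) (out : Int) : Prop := out = fillCups_alt amount
instance (amount : List Int) (out : Int) : Decidable (Spec_fillCups amount out) := by
  unfold Spec_fillCups; infer_instance

-- ===== CLAIM (what is proved, stated in full; the proofs are below) =====
def Claim_equal_fillCups : Prop := ∀ (amount : List Int), Dom_fillCups amount →
  Pre_fillCups amount → Spec_fillCups amount (fillCups amount)

-- ===== LEMMAS AND PROOFS =====

-- One loop step of A: decrementing positions 2 and 1 of the sorted list a::b::c::rest and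
-- re-sorting yields the sort of {a, b-1, c-1} followed by the untouched tail.
theorem pv_sorted_step (a b c : Int) (rest : List Int)
    (h : (a :: b :: c :: rest).Pairwise (fun x y => x ≤ y)) :
    PySem.List.sorted (a :: (b - 1) :: (c - 1) :: rest) (fun x => x) false =
      (if a ≤ b - 1 then [a, b - 1, c - 1]
       else if a ≤ c - 1 then [b - 1, a, c - 1]
       else [b - 1, c - 1, a]) ++ rest := by
  have hab : a ≤ b := (List.pairwise_cons.1 h).1 b (by simp)
  have hac : a ≤ c := (List.pairwise_cons.1 h).1 c (by simp)
  have har : ∀ r ∈ rest, a ≤ r := fun r hr => (List.pairwise_cons.1 h).1 r (by simp [hr])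
  have h2 := (List.pairwise_cons.1 h).2
  have hbc : b ≤ c := (List.pairwise_cons.1 h2).1 c (by simp)
  have hbr : ∀ r ∈ rest, b ≤ r := fun r hr => (List.pairwise_cons.1 h2).1 r (by simp [hr])
  have h3 := (List.pairwise_cons.1 h2).2
  have hcr : ∀ r ∈ rest, c ≤ r := fun r hr => (List.pairwise_cons.1 h3).1 r hr
  have hrest : rest.Pairwise (fun x y => x ≤ y) := (List.pairwise_cons.1 h3).2
  apply PySem.List.sorted_id_eq_of_perm_of_pairwise
  · split_ifs with h1 h2'
    · exact List.Perm.refl _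
    · exact List.Perm.append_right rest (List.Perm.swap _ _ _)
    · exact List.Perm.append_right rest
        (List.perm_append_singleton a [b - 1, c - 1])
  · split_ifs with h1 h2' <;>
      refine List.pairwise_append.2 ⟨?_, hrest, ?_⟩ <;>
      first
      | (simp [List.pairwise_cons]; omega)
      | (intro x hx r hr
         have hc1 := hcr r hr
         have ha1 := har r hr
         simp at hx
         rcases hx with rfl | rfl | rfl <;> omega)

-- The closed form reached by A's loop, as a function of the sorted list.
def pvF (l : List Int) : Int :=
  match l with
  | a :: b :: c :: _ =>
      max (max c 0) (PySem.Int.floordiv (max a 0 + max b 0 + max c 0 + 1) 2)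
  | _ => 0

theorem pvF_cons (a b c : Int) (t : List Int) :
    pvF (a :: b :: c :: t) =
      max (max c 0) (PySem.Int.floordiv (max a 0 + max b 0 + max c 0 + 1) 2) := rfl

theorem fillCupsLoop_closed (fuel : Nat) (ans : Int) (l : List Int)
    (hfuel : pvClampSum3 (PySem.List.sorted l (fun x => x) false) < fuel) :
    fillCupsLoop fuel ans l = ans + pvF (PySem.List.sorted l (fun x => x) false) := by
  induction fuel generalizing ans l with
  | zero => omega
  | succ fuel ih =>
      rw [fillCupsLoop]
      rcases hs : PySem.List.sorted l (fun x => x) false with _ | ⟨a, _ | ⟨b, _ | ⟨c, rest⟩⟩⟩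
      · simp [pvF]
      · simp [pvF]
      · simp [pvF]
      · have hp : (a :: b :: c :: rest).Pairwise (fun x y => x ≤ y) := by
          have := PySem.List.sorted_pairwise l (fun x => x)
          rwa [hs] at this
        have hab : a ≤ b := (List.pairwise_cons.1 hp).1 b (by simp)
        have hbc : b ≤ c := (List.pairwise_cons.1 (List.pairwise_cons.1 hp).2).1 c (by simp)
        rw [hs] at hfuel
        by_cases hc : c > 0
        · simp only [hc, if_true]
          have hmeas : pvClampSum3
              (PySem.List.sorted (a :: (b - 1) :: (c - 1) :: rest) (fun x => x) false) < fuel := by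
            rw [pv_sorted_step a b c rest hp]
            simp [pvClampSum3] at hfuel
            split_ifs <;> simp [pvClampSum3, List.take_succ_cons] <;> omega
          rw [ih (ans + 1) _ hmeas]
          rw [pv_sorted_step a b c rest hp]
          split_ifs with h1 h2' <;>
            simp only [List.cons_append, List.nil_append, pvF_cons] <;>
            rw [PySem.Int.floordiv_eq_ediv_of_pos (by norm_num),
                PySem.Int.floordiv_eq_ediv_of_pos (by norm_num)] <;>
            simp only [max_def] <;> split_ifs <;> omega
        · simp only [hc, if_false, pvF_cons]
          rw [PySem.Int.floordiv_eq_ediv_of_pos (by norm_num)]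
          simp only [max_def]
          split_ifs <;> omega

-- ===== VERDICT (by name: the statement is the Claim_ definition above) =====
theorem fillCups_spec : Claim_equal_fillCups := by
  intro amount hdom hpre
  unfold Pre_fillCups at hpre
  unfold Spec_fillCups fillCups fillCups_alt
  have hlen : (PySem.List.sorted amount (fun x => x) false).length = amount.length :=
    PySem.List.length_sorted amount (fun x => x) false
  rw [fillCupsLoop_closed _ _ _ (by omega)]
  rcases hs : PySem.List.sorted amount (fun x => x) false with _ | ⟨a, _ | ⟨b, _ | ⟨c, rest⟩⟩⟩ <;>
    rw [hs] at hlen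
  · exfalso; simp at hlen; omega
  · exfalso; simp at hlen; omega
  · exfalso; simp at hlen; omega
  · rw [pvF_cons]
    simp [List.take]
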